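-- pv_equiv track=rewrite | github.com/DevJoyKo/algorithms | problems_n_solutions/CDSIG_pop_cities.py | pop_nodes1
-- ===== SOURCE A (Python) =====
-- def pop_nodes1(graph, del_list, iteration, node_iter):
--     iteration += 1
--     new_del_list = [*del_list]
--     check_flag = False
--
--     for node in graph.keys():
--         if node in del_list: continue
--         adjacents = [nd for nd in graph[node] if nd not in del_list]
--
--         if len(adjacents) <= 1 or not graph[node]:
--             check_flag = True
--             node_iter[node] = iteration
--             new_del_list += [node]
--
--     if check_flag:
--         pop_nodes1(graph, new_del_list, iteration, node_iter)
--
--     return del_list, iteration, node_iter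
-- ===== SOURCE B (Python) =====
-- def pop_nodes1(graph, del_list, iteration, node_iter):
--     # Iterative degree-counter peeling: build live-degree counters and a reverse
--     # index once, then peel rounds decrementing neighbour degrees instead of
--     # re-filtering every adjacency list against a linear del_list each round.
--     deleted = set(del_list)
--     deg = {v: sum(1 for nd in nbrs if nd not in deleted) for v, nbrs in graph.items()}
--     rev = {}
--     for v, nbrs in graph.items():
--         for nd in nbrs:
--             if nd in deg:
--                 rev.setdefault(nd, []).append(v)
--     alive = [v for v in graph if v not in deleted]
--     r = iteration
--     while True:
--         frontier = [v for v in alive if deg[v] <= 1]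
--         if not frontier:
--             break
--         r += 1
--         for v in frontier:
--             node_iter[v] = r
--         alive = [v for v in alive if deg[v] > 1]
--         for v in frontier:
--             for u in rev.get(v, ()):
--                 deg[u] -= 1
--     return del_list, iteration + 1, node_iter
-- ===== Notes on version B (the rewrite author's own statement) =====
-- stated objective: faster
-- what changed: A recursively re-scans all keys every round and re-filters each adjacency list against a linearly-searched del_list; B builds degree counters, a deleted set and a reverse index once, then peels rounds iteratively by decrementing neighbour degrees and shrinking an alive list.
import Mathlib
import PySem

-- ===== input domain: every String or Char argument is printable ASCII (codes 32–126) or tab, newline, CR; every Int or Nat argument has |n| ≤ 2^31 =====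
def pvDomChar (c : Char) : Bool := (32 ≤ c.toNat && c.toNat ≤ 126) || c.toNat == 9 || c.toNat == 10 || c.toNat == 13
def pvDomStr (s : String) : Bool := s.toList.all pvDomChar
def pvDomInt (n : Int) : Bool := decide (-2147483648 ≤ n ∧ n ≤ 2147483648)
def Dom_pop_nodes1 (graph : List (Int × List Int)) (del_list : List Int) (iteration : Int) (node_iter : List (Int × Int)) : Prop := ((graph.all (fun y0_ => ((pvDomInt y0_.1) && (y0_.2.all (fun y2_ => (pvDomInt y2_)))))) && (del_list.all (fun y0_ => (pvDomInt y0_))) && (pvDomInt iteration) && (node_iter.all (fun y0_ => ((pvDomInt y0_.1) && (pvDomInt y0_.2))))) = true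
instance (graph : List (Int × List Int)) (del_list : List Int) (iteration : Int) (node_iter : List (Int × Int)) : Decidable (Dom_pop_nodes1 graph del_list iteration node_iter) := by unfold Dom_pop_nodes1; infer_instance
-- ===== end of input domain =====

-- B replaces A's recursive re-scan (re-filtering every adjacency list against a linear
-- del_list each round) by one-pass degree counters plus a reverse index decremented as
-- nodes are peeled. Equivalence is about the RETURN value (Python A and B both mutate
-- the node_iter dict they also return, in the same way).

-- ===== PORT A =====
-- one step of A's `for node in graph.keys()` loop; state = (new_del_list, check_flag, node_iter)
def popAround (g : PySem.Dict Int (List Int)) (del_list : List Int) (iteration : Int)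
    (st : List Int × Bool × PySem.Dict Int Int) (node : Int) : List Int × Bool × PySem.Dict Int Int :=
  if del_list.contains node then st
  else
    let adjacents := (g.getD node []).filter (fun nd => !del_list.contains nd)
    if adjacents.length ≤ 1 ∨ g.getD node [] = [] then
      (st.1 ++ [node], true, st.2.2.insert node iteration)
    else st

-- A's recursion; the fuel only makes the same recursion total (the wrapper's fuel is
-- never exhausted: every recursive call happens only after at least one further key
-- joined new_del_list, so there are at most |keys| + 1 nested calls).
def popAgo (g : PySem.Dict Int (List Int)) : Nat → List Int → Int → PySem.Dict Int Int →
    List Int × Int × PySem.Dict Int Int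
  | fuel, del_list, iteration, node_iter =>
    let it := iteration + 1
    let res := g.keys.foldl (popAround g del_list it) (del_list, false, node_iter)
    if res.2.1 then
      match fuel with
      | 0 => (del_list, it, res.2.2)
      | fuel + 1 => (del_list, it, (popAgo g fuel res.1 it res.2.2).2.2)
    else (del_list, it, res.2.2)

def pop_nodes1 (graph : List (Int × List Int)) (del_list : List Int) (iteration : Int)
    (node_iter : List (Int × Int)) : List Int × Int × (List (Int × Int)) :=
  let g : PySem.Dict Int (List Int) := PySem.Dict.mk graph
  let r := popAgo g (g.keys.length + 1) del_list iteration (PySem.Dict.mk node_iter)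
  (r.1, r.2.1, r.2.2.items)

-- ===== PORT B =====
-- B's `while True` peeling loop; the fuel only makes the loop total (the wrapper's fuel
-- is never exhausted: each executed round removes at least one alive node).
def popBloop (rev : PySem.Dict Int (List Int)) : Nat → List Int → PySem.Dict Int Int → Int →
    PySem.Dict Int Int → PySem.Dict Int Int
  | fuel, alive, deg, r, node_iter =>
    let frontier := alive.filter (fun v => deg.getD v 0 ≤ 1)   -- deg[v]: key always present, getD is exact
    if frontier.isEmpty then node_iter
    else
      let r' := r + 1
      let ni := frontier.foldl (fun ni v => ni.insert v r') node_iter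
      let alive' := alive.filter (fun v => 1 < deg.getD v 0)
      let deg' := frontier.foldl
        (fun dg v => (rev.getD v []).foldl (fun dg u => dg.modify u 0 (fun x => x - 1)) dg) deg
      match fuel with
      | 0 => ni
      | fuel + 1 => popBloop rev fuel alive' deg' r' ni

def pop_nodes1_alt (graph : List (Int × List Int)) (del_list : List Int) (iteration : Int)
    (node_iter : List (Int × Int)) : List Int × Int × (List (Int × Int)) :=
  let g : PySem.Dict Int (List Int) := PySem.Dict.mk graph
  let deleted : PySem.Set Int := PySem.Set.ofList del_list
  let deg : PySem.Dict Int Int := g.items.foldl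
    (fun d p => d.insert p.1 ((p.2.filter (fun nd => !deleted.contains nd)).length : Int))
    PySem.Dict.empty
  let rev : PySem.Dict Int (List Int) := g.items.foldl
    (fun rv p => p.2.foldl
      (fun rv nd => if deg.contains nd then rv.modify nd [] (fun l => l ++ [p.1]) else rv) rv)
    PySem.Dict.empty
  let alive := g.keys.filter (fun v => !deleted.contains v)
  let ni := popBloop rev (g.keys.length + 1) alive deg iteration (PySem.Dict.mk node_iter)
  (del_list, iteration + 1, ni.items)

-- ===== PRECONDITION & SPEC =====
-- Pre_ excludes association lists with duplicate graph keys: they do not encode a Python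
-- dict (Python collapses duplicate keys at construction), so neither Python receives them.
def Pre_pop_nodes1 (graph : List (Int × List Int)) (del_list : List Int) (iteration : Int)
    (node_iter : List (Int × Int)) : Prop := (graph.map Prod.fst).Nodup
instance (graph : List (Int × List Int)) (del_list : List Int) (iteration : Int) (node_iter : List (Int × Int)) : Decidable (Pre_pop_nodes1 graph del_list iteration node_iter) := by unfold Pre_pop_nodes1; infer_instance

def pvWitness_pop_nodes1 : (List (Int × List Int)) × List Int × Int × (List (Int × Int)) :=
  ([(1, [2, 3]), (2, [1]), (3, [1])], [], 0, [])

def Spec_pop_nodes1 (graph : List (Int × List Int)) (del_list : List Int) (iteration : Int) (node_iter : List (Int × Int)) (out : List Int × Int × (List (Int × Int))) : Prop := out = pop_nodes1_alt graph del_list iteration node_iter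
instance (graph : List (Int × List Int)) (del_list : List Int) (iteration : Int) (node_iter : List (Int × Int)) (out : List Int × Int × (List (Int × Int))) : Decidable (Spec_pop_nodes1 graph del_list iteration node_iter out) := by unfold Spec_pop_nodes1; infer_instance

-- ===== CLAIM (what is proved, stated in full; the proofs are below) =====
def Claim_equal_pop_nodes1 : Prop := ∀ (graph : List (Int × List Int)) (del_list : List Int) (iteration : Int) (node_iter : List (Int × Int)), Dom_pop_nodes1 graph del_list iteration node_iter → Pre_pop_nodes1 graph del_list iteration node_iter → Spec_pop_nodes1 graph del_list iteration node_iter (pop_nodes1 graph del_list iteration node_iter)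

-- ===== LEMMAS AND PROOFS =====

def condA (g : PySem.Dict Int (List Int)) (S : List Int) (v : Int) : Bool :=
  decide (((g.getD v []).filter (fun nd => !S.contains nd)).length ≤ 1) || decide (g.getD v [] = [])

lemma roundA (g : PySem.Dict Int (List Int)) (S : List Int) (it : Int) :
    ∀ (l : List Int) (pre : List Int) (b : Bool) (ni : PySem.Dict Int Int),
      l.foldl (popAround g S it) (pre, b, ni) =
        (pre ++ l.filter (fun v => !S.contains v && condA g S v),
         b || !(l.filter (fun v => !S.contains v && condA g S v)).isEmpty,
         (l.filter (fun v => !S.contains v && condA g S v)).foldl (fun ni v => ni.insert v it) ni) := by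
  intro l
  induction l with
  | nil => intro pre b ni; simp
  | cons x l ih =>
    intro pre b ni
    rw [List.foldl_cons]
    by_cases hx : S.contains x = true
    · have hstep : popAround g S it (pre, b, ni) x = (pre, b, ni) := by
        unfold popAround; rw [if_pos hx]
      have hfc : (x :: l).filter (fun v => !S.contains v && condA g S v)
          = l.filter (fun v => !S.contains v && condA g S v) := by
        rw [List.filter_cons]; rw [hx]; simp
      rw [hstep, ih, hfc]
    · have hxf : S.contains x = false := by simpa using hx
      by_cases hc : (((g.getD x []).filter (fun nd => !S.contains nd)).length ≤ 1 ∨ g.getD x [] = [])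
      · have hstep : popAround g S it (pre, b, ni) x = (pre ++ [x], true, ni.insert x it) := by
          simp only [popAround, hxf, Bool.false_eq_true, if_false]
          rw [if_pos hc]
        have hca : condA g S x = true := by
          simp only [condA, Bool.or_eq_true, decide_eq_true_eq]; exact hc
        have hfc : (x :: l).filter (fun v => !S.contains v && condA g S v)
            = x :: l.filter (fun v => !S.contains v && condA g S v) := by
          rw [List.filter_cons]; rw [hxf, hca]; simp
        rw [hstep, ih, hfc]
        simp only [List.foldl_cons, List.isEmpty_cons, Bool.not_false, Bool.or_true,
          Bool.true_or, List.append_assoc, List.singleton_append]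
      · have hca : condA g S x = false := by
          obtain ⟨h1, h2⟩ := not_or.mp hc
          simp only [condA, decide_eq_false h1, decide_eq_false h2, Bool.or_false]
        have hstep : popAround g S it (pre, b, ni) x = (pre, b, ni) := by
          simp only [popAround, hxf, Bool.false_eq_true, if_false]
          rw [if_neg hc]
        have hfc : (x :: l).filter (fun v => !S.contains v && condA g S v)
            = l.filter (fun v => !S.contains v && condA g S v) := by
          rw [List.filter_cons]; rw [hca]; simp
        rw [hstep, ih, hfc]

lemma condA_eq (g : PySem.Dict Int (List Int)) (S : List Int) (v : Int) :
    condA g S v = decide (((g.getD v []).filter (fun nd => !S.contains nd)).length ≤ 1) := by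
  by_cases h : g.getD v [] = [] <;> simp [condA, h]

lemma dec_inner (l : List Int) :
    ∀ (dg : PySem.Dict Int Int) (w : Int),
      (l.foldl (fun dg u => dg.modify u 0 (fun x => x - 1)) dg).getD w 0
        = dg.getD w 0 - (l.count w : Int) := by
  induction l with
  | nil => intro dg w; simp
  | cons u t ih =>
    intro dg w
    rw [List.foldl_cons, ih, PySem.Dict.getD_modify]
    by_cases h : w = u
    · subst h
      rw [if_pos rfl, List.count_cons_self]
      push_cast; ring
    · rw [if_neg h, List.count_cons_of_ne (fun h' => h h'.symm)]

lemma count_split (S F : List Int) (hSF : ∀ x ∈ F, S.contains x = false) :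
    ∀ (nbrs : List Int),
      ((nbrs.filter (fun nd => !(S ++ F).contains nd)).length : Int)
        = ((nbrs.filter (fun nd => !S.contains nd)).length : Int)
          - (nbrs.countP (fun nd => F.contains nd) : Int) := by
  intro nbrs
  induction nbrs with
  | nil => simp
  | cons x t ih =>
    rw [List.filter_cons, List.filter_cons, List.countP_cons]
    by_cases hS : x ∈ S
    · by_cases hF : x ∈ F
      · have hc := hSF x hF
        simp [hS] at hc
      · have p1 : (!(S ++ F).contains x) = false := by simp [hS]
        have p2 : (!S.contains x) = false := by simp [hS]
        have p3 : (F.contains x) = false := by simp [hF]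
        rw [p1, p2, p3]
        simpa using ih
    · by_cases hF : x ∈ F
      · have p1 : (!(S ++ F).contains x) = false := by simp [hF]
        have p2 : (!S.contains x) = true := by simp [hS]
        have p3 : (F.contains x) = true := by simp [hF]
        rw [p1, p2, p3]
        simp only [if_false, if_true, Bool.false_eq_true, List.length_cons]
        push_cast
        omega
      · have p1 : (!(S ++ F).contains x) = true := by simp [hS, hF]
        have p2 : (!S.contains x) = true := by simp [hS]
        have p3 : (F.contains x) = false := by simp [hF]
        rw [p1, p2, p3]
        simp only [if_true, if_false, Bool.false_eq_true, List.length_cons]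
        push_cast
        omega

lemma count_cons_split (f : Int) (F : List Int) (hf : f ∉ F) (l : List Int) :
    (l.countP (fun nd => (f :: F).contains nd) : Int)
      = (l.count f : Int) + (l.countP (fun nd => F.contains nd) : Int) := by
  induction l with
  | nil => simp
  | cons x t ih =>
    rw [List.countP_cons, List.countP_cons, List.count_cons]
    by_cases hx : x = f
    · have p1 : ((f :: F).contains x) = true := by simp [hx]
      have p2 : (F.contains x) = false := by subst hx; simp [hf]
      have p3 : (x == f) = true := by simp [hx]
      rw [p1, p2, p3]
      push_cast
      omega
    · have p3 : (x == f) = false := by simp [hx]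
      by_cases hF : x ∈ F
      · have p1 : ((f :: F).contains x) = true := by simp [hF]
        have p2 : (F.contains x) = true := by simp [hF]
        rw [p1, p2, p3]
        push_cast
        omega
      · have p1 : ((f :: F).contains x) = false := by simp [hx, hF]
        have p2 : (F.contains x) = false := by simp [hF]
        rw [p1, p2, p3]
        push_cast
        omega

lemma dec_fold (g : PySem.Dict Int (List Int)) (rev : PySem.Dict Int (List Int))
    (Hrev : ∀ f ∈ g.keys, ∀ w ∈ g.keys, ((rev.getD f []).count w : Int) = ((g.getD w []).count f : Int)) :
    ∀ (F : List Int), F.Nodup → (∀ f ∈ F, f ∈ g.keys) →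
      ∀ (deg : PySem.Dict Int Int) (w : Int), w ∈ g.keys →
        (F.foldl (fun dg v => (rev.getD v []).foldl (fun dg u => dg.modify u 0 (fun x => x - 1)) dg) deg).getD w 0
          = deg.getD w 0 - ((g.getD w []).countP (fun nd => F.contains nd) : Int) := by
  intro F
  induction F with
  | nil => intro _ _ deg w _; simp
  | cons f F ih =>
    intro hnd hkeys deg w hw
    rw [List.foldl_cons]
    rw [ih (List.Nodup.of_cons hnd) (fun x hx => hkeys x (List.mem_cons_of_mem f hx)) _ w hw]
    rw [dec_inner, Hrev f (hkeys f List.mem_cons_self) w hw,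
        count_cons_split f F ((by simpa using (List.nodup_cons.mp hnd).1)) (g.getD w [])]
    ring

lemma rev_inner (degC : PySem.Dict Int Int) (f wv : Int) (hf : degC.contains f = true) :
    ∀ (nbrs : List Int) (rv : PySem.Dict Int (List Int)),
      (nbrs.foldl (fun rv nd => if degC.contains nd then rv.modify nd [] (fun l => l ++ [wv]) else rv) rv).getD f []
        = rv.getD f [] ++ List.replicate (nbrs.count f) wv := by
  intro nbrs
  induction nbrs with
  | nil => intro rv; simp
  | cons x rest ih =>
    intro rv
    rw [List.foldl_cons]
    by_cases hx : x = f
    · subst hx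
      rw [if_pos hf, ih, PySem.Dict.getD_modify_self, List.count_cons_self,
          List.replicate_succ]
      simp
    · have hcount : (x :: rest).count f = rest.count f := List.count_cons_of_ne hx
      rw [hcount]
      by_cases hg : degC.contains x = true
      · rw [if_pos hg, ih, PySem.Dict.getD_modify_of_ne _ _ _ (fun h => hx h.symm)]
      · rw [if_neg hg, ih]

lemma rev_outer (degC : PySem.Dict Int Int) (f : Int) (hf : degC.contains f = true) :
    ∀ (l : List (Int × List Int)) (rv : PySem.Dict Int (List Int)),
      (l.foldl (fun rv p => p.2.foldl
          (fun rv nd => if degC.contains nd then rv.modify nd [] (fun l => l ++ [p.1]) else rv) rv) rv).getD f []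
        = rv.getD f [] ++ l.flatMap (fun p => List.replicate (p.2.count f) p.1) := by
  intro l
  induction l with
  | nil => intro rv; simp
  | cons p rest ih =>
    intro rv
    rw [List.foldl_cons, ih, rev_inner degC f p.1 hf, List.flatMap_cons, List.append_assoc]



lemma flat_count_zero (f w : Int) :
    ∀ (l : List (Int × List Int)), w ∉ l.map Prod.fst →
      (l.flatMap (fun p => List.replicate (p.2.count f) p.1)).count w = 0 := by
  intro l
  induction l with
  | nil => intro _; simp
  | cons p rest ih =>
    intro hw
    rw [List.flatMap_cons, List.count_append, List.count_replicate]
    have h1 : w ∉ rest.map Prod.fst := fun h => hw (by simp [h])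
    have h2 : (p.1 == w) = false := by
      simp only [beq_eq_false_iff_ne, ne_eq]
      intro h; exact hw (by simp [← h])
    rw [ih h1, h2]
    simp

lemma flat_count (f w : Int) (nb : List Int) :
    ∀ (l : List (Int × List Int)), (l.map Prod.fst).Nodup → (w, nb) ∈ l →
      (l.flatMap (fun p => List.replicate (p.2.count f) p.1)).count w = nb.count f := by
  intro l
  induction l with
  | nil => intro _ h; simp at h
  | cons p rest ih =>
    intro hnd hmem
    rw [List.flatMap_cons, List.count_append, List.count_replicate]
    rcases List.mem_cons.mp hmem with h | h
    · have hp1 : p.1 = w := by rw [← h]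
      have : w ∉ rest.map Prod.fst := by
        rw [← hp1]; exact (List.nodup_cons.mp (by simpa using hnd)).1
      rw [flat_count_zero f w rest this]
      have hv : p.2 = nb := by rw [← h]
      simp [hp1, hv]
    · have hw : w ∈ rest.map Prod.fst := by
        simpa using List.mem_map_of_mem (f := Prod.fst) h
      have hp1 : (p.1 == w) = false := by
        simp only [beq_eq_false_iff_ne, ne_eq]
        intro he
        have hpn : p.1 ∉ rest.map Prod.fst := (List.nodup_cons.mp (by simpa using hnd)).1
        rw [he] at hpn; exact hpn hw
      have hndr : (rest.map Prod.fst).Nodup := (List.nodup_cons.mp (by simpa using hnd)).2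
      rw [hp1, ih hndr h]
      simp

lemma rev_count (g : PySem.Dict Int (List Int)) (hnd : g.keys.Nodup)
    (degC : PySem.Dict Int Int) (hC : ∀ x, degC.contains x = decide (x ∈ g.keys)) :
    ∀ f ∈ g.keys, ∀ w ∈ g.keys,
      (((g.items.foldl
          (fun rv p => p.2.foldl
            (fun rv nd => if degC.contains nd then rv.modify nd [] (fun l => l ++ [p.1]) else rv) rv)
          PySem.Dict.empty).getD f []).count w : Int)
        = ((g.getD w []).count f : Int) := by
  intro f hf w hw
  have hfC : degC.contains f = true := by rw [hC f]; simpa using hf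
  rw [rev_outer degC f hfC g.items PySem.Dict.empty]
  obtain ⟨⟨w', nb⟩, hp, hp1⟩ := List.mem_map.mp hw
  cases hp1
  have hgetD : g.getD w' [] = nb := PySem.Dict.getD_of_mem_items g hp hnd []
  rw [hgetD]
  have := flat_count f w' nb g.items hnd hp
  simp [PySem.Dict.getD_empty, this]

def front (g : PySem.Dict Int (List Int)) (S : List Int) : List Int :=
  g.keys.filter (fun v => !S.contains v && condA g S v)

lemma front_not_mem_S (g : PySem.Dict Int (List Int)) (S : List Int) :
    ∀ x ∈ front g S, S.contains x = false := by
  intro x hx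
  have h2 := (List.mem_filter.mp hx).2
  by_cases h : S.contains x = true
  · rw [h] at h2; simp at h2
  · simpa using h

lemma front_sub_keys (g : PySem.Dict Int (List Int)) (S : List Int) :
    ∀ x ∈ front g S, x ∈ g.keys := fun x hx => (List.mem_filter.mp hx).1

lemma frontier_eq (g : PySem.Dict Int (List Int)) (S alive : List Int) (deg : PySem.Dict Int Int)
    (halive : alive = g.keys.filter (fun v => !S.contains v))
    (hdeg : ∀ v ∈ g.keys, deg.getD v 0 = (((g.getD v []).filter (fun nd => !S.contains nd)).length : Int)) :
    alive.filter (fun v => deg.getD v 0 ≤ 1) = front g S := by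
  subst halive
  rw [List.filter_filter]
  apply List.filter_congr
  intro v hv
  by_cases hS : v ∈ S
  · simp [hS]
  · simp only [hdeg v hv, condA_eq]
    simp [hS, Nat.cast_le_one]

lemma alive_eq (g : PySem.Dict Int (List Int)) (S alive : List Int) (deg : PySem.Dict Int Int)
    (halive : alive = g.keys.filter (fun v => !S.contains v))
    (hdeg : ∀ v ∈ g.keys, deg.getD v 0 = (((g.getD v []).filter (fun nd => !S.contains nd)).length : Int)) :
    alive.filter (fun v => 1 < deg.getD v 0)
      = g.keys.filter (fun v => !(S ++ front g S).contains v) := by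
  subst halive
  rw [List.filter_filter]
  apply List.filter_congr
  intro v hv
  by_cases hS : v ∈ S
  · simp [hS]
  · have hvF : v ∈ front g S ↔ condA g S v = true := by
      simp [front, List.mem_filter, hv, hS]
    by_cases hc : condA g S v = true
    · have hlen : ¬ (1 : Int) < deg.getD v 0 := by
        rw [hdeg v hv]
        exact_mod_cast Nat.not_lt.mpr (by simpa [condA_eq] using hc)
      simp [hS, hlen, hvF.mpr hc]
    · have hlen : (1 : Int) < deg.getD v 0 := by
        rw [hdeg v hv]
        exact_mod_cast Nat.not_le.mp (by simpa [condA_eq] using hc)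
      have hvnF : v ∉ front g S := fun h => hc (hvF.mp h)
      simp [hS, hlen, hvnF]

lemma deg_eq (g : PySem.Dict Int (List Int)) (hnd : g.keys.Nodup)
    (rev : PySem.Dict Int (List Int))
    (Hrev : ∀ f ∈ g.keys, ∀ w ∈ g.keys, ((rev.getD f []).count w : Int) = ((g.getD w []).count f : Int))
    (S : List Int) (deg : PySem.Dict Int Int)
    (hdeg : ∀ v ∈ g.keys, deg.getD v 0 = (((g.getD v []).filter (fun nd => !S.contains nd)).length : Int)) :
    ∀ w ∈ g.keys,
      ((front g S).foldl (fun dg v => (rev.getD v []).foldl (fun dg u => dg.modify u 0 (fun x => x - 1)) dg) deg).getD w 0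
        = (((g.getD w []).filter (fun nd => !(S ++ front g S).contains nd)).length : Int) := by
  intro w hw
  rw [dec_fold g rev Hrev (front g S) (List.Nodup.filter _ hnd) (front_sub_keys g S) deg w hw,
      hdeg w hw, count_split S (front g S) (front_not_mem_S g S) (g.getD w [])]

lemma roundA_keys (g : PySem.Dict Int (List Int)) (S : List Int) (it : Int) (ni : PySem.Dict Int Int) :
    g.keys.foldl (popAround g S it) (S, false, ni)
      = (S ++ front g S, !(front g S).isEmpty,
         (front g S).foldl (fun ni v => ni.insert v it) ni) := by
  rw [roundA g S it g.keys S false ni]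
  rfl

lemma go_eq (g : PySem.Dict Int (List Int)) (hnd : g.keys.Nodup)
    (rev : PySem.Dict Int (List Int))
    (Hrev : ∀ f ∈ g.keys, ∀ w ∈ g.keys, ((rev.getD f []).count w : Int) = ((g.getD w []).count f : Int)) :
    ∀ (fuel : Nat) (S alive : List Int) (deg : PySem.Dict Int Int) (r : Int) (ni : PySem.Dict Int Int),
      alive = g.keys.filter (fun v => !S.contains v) →
      (∀ v ∈ g.keys, deg.getD v 0 = (((g.getD v []).filter (fun nd => !S.contains nd)).length : Int)) →
      popAgo g fuel S r ni = (S, r + 1, popBloop rev fuel alive deg r ni) := by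
  intro fuel
  induction fuel with
  | zero =>
    intro S alive deg r ni halive hdeg
    rw [popAgo, popBloop]
    simp only []
    rw [roundA_keys g S (r + 1) ni]
    rw [frontier_eq g S alive deg halive hdeg]
    by_cases hF : (front g S).isEmpty = true
    · rw [hF]
      have hFnil : front g S = [] := List.isEmpty_iff.mp hF
      rw [hFnil]
      simp
    · have hFf : (front g S).isEmpty = false := by simpa using hF
      rw [hFf]
      simp only [Bool.not_false, if_true, Bool.false_eq_true, if_false]
  | succ n ih =>
    intro S alive deg r ni halive hdeg
    rw [popAgo, popBloop]
    simp only []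
    rw [roundA_keys g S (r + 1) ni]
    rw [frontier_eq g S alive deg halive hdeg]
    by_cases hF : (front g S).isEmpty = true
    · rw [hF]
      have hFnil : front g S = [] := List.isEmpty_iff.mp hF
      rw [hFnil]
      simp
    · have hFf : (front g S).isEmpty = false := by simpa using hF
      rw [hFf]
      simp only [Bool.not_false, if_true, Bool.false_eq_true, if_false]
      rw [ih (S ++ front g S)
            (alive.filter (fun v => 1 < deg.getD v 0))
            ((front g S).foldl (fun dg v => (rev.getD v []).foldl (fun dg u => dg.modify u 0 (fun x => x - 1)) dg) deg)
            (r + 1)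
            ((front g S).foldl (fun ni v => ni.insert v (r + 1)) ni)
            (by rw [alive_eq g S alive deg halive hdeg])
            (deg_eq g hnd rev Hrev S deg hdeg)]

lemma pop_nodes1_eq_alt (graph : List (Int × List Int)) (del_list : List Int) (iteration : Int)
    (node_iter : List (Int × Int)) (hnd0 : (graph.map Prod.fst).Nodup) :
    pop_nodes1 graph del_list iteration node_iter = pop_nodes1_alt graph del_list iteration node_iter := by
  simp only [pop_nodes1, pop_nodes1_alt]
  set g : PySem.Dict Int (List Int) := PySem.Dict.mk graph with hg
  have hnd : g.keys.Nodup := hnd0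
  set deleted : PySem.Set Int := PySem.Set.ofList del_list with hdel
  have hdelc : ∀ x, deleted.contains x = del_list.contains x := by
    intro x
    rw [PySem.Set.contains_eq_listContains]
    by_cases hx : x ∈ del_list
    · simp [hdel, PySem.Set.mem_ofList, hx]
    · simp [hdel, PySem.Set.mem_ofList, hx]
  set deg0 : PySem.Dict Int Int := g.items.foldl
    (fun d p => d.insert p.1 ((p.2.filter (fun nd => !deleted.contains nd)).length : Int))
    PySem.Dict.empty with hdeg0def
  have hkeys : deg0.keys = g.keys := by
    rw [hdeg0def, PySem.Dict.keys_foldl_insert_key g.items Prod.fst _ PySem.Dict.empty]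
    rw [PySem.Dict.keys_empty, PySem.Set.update_nil_left]
    exact PySem.Set.ofList_eq_self_of_nodup g.keys hnd
  have hC : ∀ x, deg0.contains x = decide (x ∈ g.keys) := by
    intro x
    rw [PySem.Dict.contains_eq_decide_mem_keys, hkeys]
  have hitems : deg0.items = g.items.map
      (fun p => (p.1, ((p.2.filter (fun nd => !deleted.contains nd)).length : Int))) := by
    rw [hdeg0def, PySem.Dict.items_foldl_insert_fresh g.items Prod.fst
        (fun p => ((p.2.filter (fun nd => !deleted.contains nd)).length : Int)) PySem.Dict.empty
        (fun a _ => by simp) hnd0]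
    rfl
  have hdeg : ∀ v ∈ g.keys, deg0.getD v 0
      = (((g.getD v []).filter (fun nd => !del_list.contains nd)).length : Int) := by
    intro v hv
    obtain ⟨⟨v', nb⟩, hp, hp1⟩ := List.mem_map.mp hv
    cases hp1
    have hmem : (v', ((nb.filter (fun nd => !deleted.contains nd)).length : Int)) ∈ deg0.items := by
      rw [hitems]
      exact List.mem_map_of_mem hp
    have h1 : deg0.getD v' 0 = ((nb.filter (fun nd => !deleted.contains nd)).length : Int) :=
      PySem.Dict.getD_of_mem_items deg0 hmem (by rw [hkeys]; exact hnd) 0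
    have h2 : g.getD v' [] = nb := PySem.Dict.getD_of_mem_items g hp hnd []
    rw [h1, h2]
    congr 1
    rw [List.filter_congr (fun nd _ => by rw [hdelc nd])]
  have halive : g.keys.filter (fun v => !deleted.contains v)
      = g.keys.filter (fun v => !del_list.contains v) :=
    List.filter_congr (fun v _ => by rw [hdelc v])
  have Hrev := rev_count g hnd deg0 hC
  rw [halive]
  rw [go_eq g hnd _ Hrev (g.keys.length + 1) del_list
        (g.keys.filter (fun v => !del_list.contains v)) deg0 iteration (PySem.Dict.mk node_iter)
        rfl hdeg]

-- ===== VERDICT (by name: the statement is the Claim_ definition above) =====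
theorem pop_nodes1_spec : Claim_equal_pop_nodes1 := by
  intro graph del_list iteration node_iter _ hpre
  unfold Spec_pop_nodes1
  exact pop_nodes1_eq_alt graph del_list iteration node_iter hpre
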